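-- pv_equiv track=rewrite | github.com/uma-c/CodingProblemSolving | 2-pointer/reverse_alpha_in_str.py | reverse_alpha
-- ===== SOURCE A (Python) =====
-- def reverse_alpha(s: str)->str:
--     result = [''] * len(s)
--
--     left, right = 0, len(s) - 1
--     while left <= right:
--         if not s[left].isalpha():
--             result[left] = s[left]
--             left += 1
--         elif not s[right].isalpha():
--             result[right] = s[right]
--             right -= 1
--         else:
--             result[right] = s[left]
--             result[left] = s[right]
--             left += 1
--             right -= 1
--
--     return ''.join(result)
-- ===== SOURCE B (Python) =====
-- def reverse_alpha(s: str) -> str: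
--     # extract-reverse-refill: one pass collecting letters, one pass rebuilding
--     rev = iter([c for c in s if c.isalpha()][::-1])
--     return ''.join(next(rev) if c.isalpha() else c for c in s)
-- ===== Notes on version B (the rewrite author's own statement) =====
-- stated objective: idiomatic
-- what changed: Replaces the converging two-pointer swap into a preallocated result array by an extract-reverse-refill decomposition: collect the alphabetic characters, reverse them, and rebuild the string in one forward pass consuming the reversed letters.
import Mathlib
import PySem

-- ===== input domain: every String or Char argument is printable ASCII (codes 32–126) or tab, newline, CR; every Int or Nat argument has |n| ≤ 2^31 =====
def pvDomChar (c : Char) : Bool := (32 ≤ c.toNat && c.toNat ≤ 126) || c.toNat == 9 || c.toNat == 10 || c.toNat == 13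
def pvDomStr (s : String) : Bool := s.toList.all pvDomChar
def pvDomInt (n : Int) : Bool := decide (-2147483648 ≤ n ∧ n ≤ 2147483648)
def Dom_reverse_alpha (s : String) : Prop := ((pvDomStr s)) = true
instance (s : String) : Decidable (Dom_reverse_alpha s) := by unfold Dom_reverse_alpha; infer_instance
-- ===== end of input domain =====

-- B replaces A's converging two-pointer swap into a result array by an extract-reverse-refill
-- decomposition (collect the letters, reverse them, one forward pass rebuilding the string).


-- ===== PORT A =====
-- the while loop: result is the list of (singleton) strings, indices are Python ints;
-- s[left]/s[right] are always in range when the loop body runs on the real initial call,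
-- so the .getD ' ' default is never the value used
def reverseAlphaLoop (s : List Char) (left right : Int) (result : List String) :
    List String :=
  if _h : left ≤ right then
    let cl := (PySem.List.pyGet? s left).getD ' '
    let cr := (PySem.List.pyGet? s right).getD ' '
    if ¬ PySem.Chars.isalpha cl then
      reverseAlphaLoop s (left + 1) right (PySem.List.pySetD result left (String.ofList [cl]))
    else if ¬ PySem.Chars.isalpha cr then
      reverseAlphaLoop s left (right - 1) (PySem.List.pySetD result right (String.ofList [cr]))
    else
      reverseAlphaLoop s (left + 1) (right - 1)
        (PySem.List.pySetD (PySem.List.pySetD result right (String.ofList [cl])) left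
          (String.ofList [cr]))
  else result
termination_by (right - left + 1).toNat
decreasing_by all_goals omega

def reverse_alpha (s : String) : String :=
  let result := List.replicate (PySem.Str.len s).toNat ""
  PySem.Str.join "" (reverseAlphaLoop s.toList 0 ((PySem.Str.len s) - 1) result)

-- ===== PORT B =====
-- 'next(rev) if c.isalpha() else c for c in s', consuming the reversed letters from the front;
-- the stack is never exhausted on an alpha position (it holds exactly the letters of s), so the
-- [] fallback is never the value used
def refill : List Char → List Char → List Char
  | [], _ => []
  | c :: cs, stk =>
    if PySem.Chars.isalpha c then
      match stk with
      | t :: ts => t :: refill cs ts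
      | [] => c :: refill cs []
    else c :: refill cs stk

def reverse_alpha_alt (s : String) : String :=
  String.ofList (refill s.toList ((s.toList.filter PySem.Chars.isalpha).reverse))

-- ===== PRECONDITION & SPEC =====
def Spec_reverse_alpha (s : String) (out : String) : Prop := out = reverse_alpha_alt s
instance (s : String) (out : String) : Decidable (Spec_reverse_alpha s out) := by unfold Spec_reverse_alpha; infer_instance

-- ===== CLAIM (what is proved, stated in full; the proofs are below) =====
def Claim_equal_reverse_alpha : Prop := ∀ (s : String), Dom_reverse_alpha s → Spec_reverse_alpha s (reverse_alpha s)

-- ===== LEMMAS AND PROOFS =====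

-- overwrite the slots i, i+1, … of res with the characters of l (as singleton strings)
def upd (res : List String) (i : Nat) (l : List Char) : List String :=
  res.take i ++ l.map (fun c => String.ofList [c]) ++ res.drop (i + l.length)

-- the segment s[left..right] the loop still has to process
def mid (s : List Char) (left right : Int) : List Char :=
  (s.drop left.toNat).take (right + 1 - left).toNat

theorem length_refill (xs : List Char) : ∀ stk, (refill xs stk).length = xs.length := by
  induction xs with
  | nil => intro stk; simp [refill]
  | cons c cs ih =>
    intro stk
    by_cases h : PySem.Chars.isalpha c <;> cases stk <;> simp [refill, h, ih]

theorem refill_append_nonalpha (c : Char) (hc : ¬ PySem.Chars.isalpha c)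
    (xs : List Char) : ∀ stk, refill (xs ++ [c]) stk = refill xs stk ++ [c] := by
  induction xs with
  | nil => intro stk; simp [refill, hc]
  | cons x xsr ih =>
    intro stk
    by_cases h : PySem.Chars.isalpha x <;> cases stk <;> simp [refill, h, ih]

theorem refill_append_alpha (c a : Char) (hc : PySem.Chars.isalpha c)
    (xs : List Char) : ∀ stk, stk.length = (xs.filter PySem.Chars.isalpha).length →
    refill (xs ++ [c]) (stk ++ [a]) = refill xs stk ++ [a] := by
  induction xs with
  | nil =>
    intro stk hl
    simp at hl
    subst hl
    simp [refill, hc]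
  | cons x xsr ih =>
    intro stk hl
    by_cases h : PySem.Chars.isalpha x
    · cases stk with
      | nil => simp [h] at hl
      | cons t ts =>
        simp [h] at hl
        simp [refill, h, ih ts hl]
    · simp [h] at hl
      simp [refill, h, ih stk hl]

theorem upd_nil (res : List String) (i : Nat) : upd res i [] = res := by
  simp [upd]

theorem upd_cons (res : List String) (i : Nat) (c : Char) (l : List Char)
    (h : i < res.length) :
    upd res i (c :: l) = upd (res.set i (String.ofList [c])) (i + 1) l := by
  unfold upd
  rw [List.set_eq_take_cons_drop _ h]
  rw [List.take_append, List.drop_append]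
  have h1 : i + 1 + l.length - i = l.length + 1 := by omega
  have h2 : (List.take i res).length = i := by simp [Nat.min_eq_left h.le]
  have h3 : List.drop (i + 1 + l.length) (List.take i res) = [] :=
    List.drop_eq_nil_of_le (by omega)
  simp [h1, h2, h3, List.take_take, List.drop_succ_cons]
  omega

theorem upd_snoc (res : List String) (i : Nat) (c : Char) (l : List Char)
    (h : i + l.length < res.length) :
    upd res i (l ++ [c]) = upd (res.set (i + l.length) (String.ofList [c])) i l := by
  unfold upd
  rw [List.set_eq_take_cons_drop _ h]
  rw [List.take_append, List.drop_append]
  have h2 : (List.take (i + l.length) res).length = i + l.length := by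
    simp [Nat.min_eq_left h.le]
  simp [h2, List.take_take, List.drop_eq_nil_of_le]
  omega

theorem mid_nil (s : List Char) (left right : Int) (h : right < left) :
    mid s left right = [] := by
  unfold mid
  have : (right + 1 - left).toNat = 0 := by omega
  simp [this]

theorem mid_cons (s : List Char) (left right : Int) (h0 : 0 ≤ left) (hlr : left ≤ right)
    (hL : left.toNat < s.length) :
    mid s left right = s[left.toNat] :: mid s (left + 1) right := by
  unfold mid
  rw [List.drop_eq_getElem_cons hL]
  obtain ⟨M, hM⟩ : ∃ M, (right + 1 - left).toNat = M + 1 := ⟨(right - left).toNat, by omega⟩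
  rw [hM, List.take_succ_cons]
  have e1 : (left + 1).toNat = left.toNat + 1 := by omega
  have e2 : (right + 1 - (left + 1)).toNat = M := by omega
  rw [e1, e2]

theorem mid_snoc (s : List Char) (left right : Int) (h0 : 0 ≤ left) (hlr : left ≤ right)
    (hR : right.toNat < s.length) :
    mid s left right = mid s left (right - 1) ++ [s[right.toNat]] := by
  unfold mid
  obtain ⟨M, hM⟩ : ∃ M, (right + 1 - left).toNat = M + 1 := ⟨(right - left).toNat, by omega⟩
  have e2 : (right - 1 + 1 - left).toNat = M := by omega
  rw [hM, e2, List.take_add_one]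
  have e3 : (s.drop left.toNat)[M]? = some s[right.toNat] := by
    rw [List.getElem?_drop]
    rw [List.getElem?_eq_getElem (by omega)]
    congr 1
    congr 1
    omega
  rw [e3]
  rfl

theorem mid_length (s : List Char) (left right : Int) (h0 : 0 ≤ left)
    (hR : right < (s.length : Int)) :
    (mid s left right).length = (right + 1 - left).toNat := by
  unfold mid
  simp [List.length_take, List.length_drop]
  omega

theorem loop_main (s : List Char) : ∀ (n : Nat), ∀ (left right : Int) (res : List String),
    (right + 1 - left).toNat = n → 0 ≤ left → right < (s.length : Int) →
    res.length = s.length →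
    reverseAlphaLoop s left right res =
      upd res left.toNat
        (refill (mid s left right)
          (((mid s left right).filter PySem.Chars.isalpha).reverse)) := by
  intro n
  induction n using Nat.strong_induction_on with
  | _ n ih =>
    intro left right res hn h0 hr hlen
    rw [reverseAlphaLoop]
    by_cases hlr : left ≤ right
    · rw [dif_pos hlr]
      have hL : left.toNat < s.length := by omega
      have hR : right.toNat < s.length := by omega
      have ha : (PySem.List.pyGet? s left).getD ' ' = s[left.toNat] := by
        rw [PySem.List.pyGet?_of_nonneg s h0, List.getElem?_eq_getElem hL]
        rfl
      have hb : (PySem.List.pyGet? s right).getD ' ' = s[right.toNat] := by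
        rw [PySem.List.pyGet?_of_nonneg s (by omega), List.getElem?_eq_getElem hR]
        rfl
      simp only [ha, hb]
      by_cases hAa : PySem.Chars.isalpha s[left.toNat]
      · by_cases hAb : PySem.Chars.isalpha s[right.toNat]
        · -- both ends alphabetic: swap
          rw [if_neg (by simp [hAa]), if_neg (by simp [hAb])]
          rw [PySem.List.pySetD_of_nonneg res _ (by omega), PySem.List.pySetD_of_nonneg _ _ h0]
          rcases lt_or_eq_of_le hlr with hlt | heq
          · -- left < right
            rw [ih (right - 1 - left).toNat (by omega) (left + 1) (right - 1) _
                (by omega) (by omega) (by omega) (by simp; omega)]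
            have e1 : (left + 1).toNat = left.toNat + 1 := by omega
            rw [mid_cons s left right h0 hlr hL,
                mid_snoc s (left + 1) right (by omega) (by omega) hR]
            have hcorelen : (mid s (left + 1) (right - 1)).length = (right - 1 - left).toNat := by
              rw [mid_length s (left + 1) (right - 1) (by omega) (by omega)]
              omega
            rw [List.filter_cons_of_pos hAa, List.filter_append,
                List.filter_cons_of_pos hAb]
            simp only [List.filter_nil, List.reverse_cons, List.reverse_append]
            -- stack = s[right] :: (filter core).reverse ++ [s[left]]
            have hstk : ([].reverse ++ [s[right.toNat]] ++
                ((mid s (left + 1) (right - 1)).filter PySem.Chars.isalpha).reverse ++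
                [s[left.toNat]]) = s[right.toNat] ::
                (((mid s (left + 1) (right - 1)).filter PySem.Chars.isalpha).reverse ++
                  [s[left.toNat]]) := by simp
            rw [hstk]
            rw [show refill (s[left.toNat] :: (mid s (left + 1) (right - 1) ++ [s[right.toNat]]))
                  (s[right.toNat] ::
                    (((mid s (left + 1) (right - 1)).filter PySem.Chars.isalpha).reverse ++
                      [s[left.toNat]])) =
                s[right.toNat] :: refill (mid s (left + 1) (right - 1) ++ [s[right.toNat]])
                  (((mid s (left + 1) (right - 1)).filter PySem.Chars.isalpha).reverse ++
                    [s[left.toNat]]) from by simp [refill, hAa]]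
            rw [refill_append_alpha s[right.toNat] s[left.toNat] hAb _ _ (by simp)]
            rw [upd_cons _ _ _ _ (by omega)]
            rw [upd_snoc _ _ _ _ (by simp [length_refill, hcorelen]; omega)]
            rw [e1]
            have e2 : left.toNat + 1 +
                (refill (mid s (left + 1) (right - 1))
                  (((mid s (left + 1) (right - 1)).filter PySem.Chars.isalpha).reverse)).length
                = right.toNat := by
              rw [length_refill, hcorelen]
              omega
            rw [e2, List.set_comm _ _ (by omega)]
          · -- left = right: single middle character swapped with itself
            subst heq
            rw [ih 0 (by omega) (left + 1) (left - 1) _ (by omega) (by omega) (by omega)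
                (by simp; omega)]
            rw [mid_nil s (left + 1) (left - 1) (by omega)]
            simp only [refill]
            rw [upd_nil]
            rw [mid_cons s left left h0 le_rfl hL, mid_nil s (left + 1) left (by omega)]
            rw [List.filter_cons_of_pos hAa]
            simp only [List.filter_nil, List.reverse_cons, List.reverse_nil, List.nil_append]
            rw [show refill [s[left.toNat]] [s[left.toNat]] = [s[left.toNat]] from by
              simp [refill, hAa]]
            rw [upd_cons _ _ _ _ (by omega), upd_nil, List.set_set]
        · -- right end not alphabetic: copy it
          rw [if_neg (by simp [hAa]), if_pos (by simp [hAb])]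
          rw [PySem.List.pySetD_of_nonneg res _ (by omega)]
          rw [ih (right - left).toNat (by omega) left (right - 1) _ (by omega) h0 (by omega)
              (by simp; omega)]
          rw [mid_snoc s left right h0 hlr hR]
          rw [List.filter_append, List.filter_cons_of_neg hAb, List.filter_nil,
              List.append_nil]
          rw [refill_append_nonalpha s[right.toNat] hAb]
          have hlen' : (mid s left (right - 1)).length = (right - left).toNat := by
            rw [mid_length s left (right - 1) h0 (by omega)]
            omega
          rw [upd_snoc _ _ _ _ (by simp [length_refill, hlen']; omega)]
          have e2 : left.toNat +
              (refill (mid s left (right - 1))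
                (((mid s left (right - 1)).filter PySem.Chars.isalpha).reverse)).length
              = right.toNat := by
            rw [length_refill, hlen']
            omega
          rw [e2]
      · -- left end not alphabetic: copy it
        rw [if_pos (by simp [hAa])]
        rw [PySem.List.pySetD_of_nonneg res _ h0]
        rw [ih (right - left).toNat (by omega) (left + 1) right _ (by omega) (by omega) hr
            (by simp; omega)]
        rw [mid_cons s left right h0 hlr hL]
        rw [List.filter_cons_of_neg hAa]
        rw [show refill (s[left.toNat] :: mid s (left + 1) right)
              (((mid s (left + 1) right).filter PySem.Chars.isalpha).reverse) =
            s[left.toNat] :: refill (mid s (left + 1) right)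
              (((mid s (left + 1) right).filter PySem.Chars.isalpha).reverse) from by
          simp [refill, hAa]]
        rw [upd_cons _ _ _ _ (by omega)]
        have e1 : (left + 1).toNat = left.toNat + 1 := by omega
        rw [e1]
    · rw [dif_neg hlr]
      rw [mid_nil s left right (by omega)]
      simp only [refill]
      rw [upd_nil]

theorem join_upd (l : List Char) (n : Nat) (hn : l.length = n) :
    PySem.Str.join "" (upd (List.replicate n "") 0 l) = String.ofList l := by
  subst hn
  unfold upd
  apply String.toList_inj.mp
  simp [PySem.Str.toList_join, List.drop_replicate]
  have : (String.toList ∘ fun c : Char => String.ofList [c]) = fun c => [c] := by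
    funext c
    simp
  rw [this]
  exact PySem.Chars.join_nil_singletons l

-- ===== VERDICT (by name: the statement is the Claim_ definition above) =====
theorem reverse_alpha_spec : Claim_equal_reverse_alpha := by
  intro s _
  unfold Spec_reverse_alpha reverse_alpha reverse_alpha_alt
  have hlen : PySem.Str.len s = (s.toList.length : Int) := by
    simp [PySem.Str.len]
  simp only [hlen]
  rw [loop_main s.toList (((s.toList.length : Int) - 1) + 1 - 0).toNat 0
      ((s.toList.length : Int) - 1) _ rfl (by omega) (by omega) (by simp)]
  have hmid : mid s.toList 0 ((s.toList.length : Int) - 1) = s.toList := by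
    unfold mid
    simp
  rw [hmid]
  have hcast : ((s.toList.length : Int)).toNat = s.toList.length := by omega
  rw [hcast]
  exact join_upd _ _ (length_refill _ _)
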